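-- pv_equiv track=rewrite | github.com/luke-a-thompson/QuickSig | quicksig/analytics/signature_sizes.py | _a000081_upto
-- ===== SOURCE A (Python) =====
-- def _a000081_upto(max_n: int) -> list[int]:
--     """Compute A000081(1..max_n): number of unlabeled rooted trees with n nodes.
--
--     Uses the standard recurrence:
--         a(1) = 1
--         a(n) = (1/(n-1)) * sum_{k=1}^{n-1} ( sum_{d|k} d * a(d) ) * a(n-k),  n > 1
--
--     Implementation detail:
--     - Maintain s[k] = sum_{d|k} d * a(d) incrementally. When a(n) is found,
--       we add n * a(n) to all multiples of n in s. This yields overall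
--       complexity O(N^2 + N log N), which is easily sufficient for signature
--       depths used in practice.
--     """
--     if max_n <= 0:
--         return []
--     # a[0] unused; work 1-based for clarity
--     a: list[int] = [0] * (max_n + 1)
--     s: list[int] = [0] * (max_n + 1)
--     a[1] = 1
--     # d = 1 contributes 1 * a(1) to every k
--     for m in range(1, max_n + 1):
--         s[m] += 1
--     for n in range(2, max_n + 1):
--         acc = 0
--         for k in range(1, n):
--             acc += s[k] * a[n - k]
--         a[n] = acc // (n - 1)
--         # Update divisor-sum array for new a(n)
--         inc = n * a[n]
--         for m in range(n, max_n + 1, n):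
--             s[m] += inc
--     # Return [a(1), a(2), ..., a(max_n)]
--     return a[1:]
-- ===== SOURCE B (Python) =====
-- def _a000081_upto(max_n: int) -> list[int]:
--     """A000081(1..max_n) via the unfolded double sum
--         a(n) = (1/(n-1)) * sum_{d>=1} d*a(d) * sum_{j>=1, d*j<n} a(n-d*j),
--     enumerating the multiples of each d directly; no divisor-sum array is kept."""
--     if max_n <= 0:
--         return []
--     a = [0] * (max_n + 1)
--     a[1] = 1
--     for n in range(2, max_n + 1):
--         total = 0
--         for d in range(1, n):
--             sub = 0
--             for m in range(d, n, d):
--                 sub += a[n - m]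
--             total += d * a[d] * sub
--         a[n] = total // (n - 1)
--     return a[1:]
-- ===== Notes on version B (the rewrite author's own statement) =====
-- stated objective: alternative
-- what changed: B drops A's incrementally maintained divisor-sum array s[] entirely and instead computes a(n) directly from the unfolded double sum, enumerating for each d the multiples of d below n.
import Mathlib
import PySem

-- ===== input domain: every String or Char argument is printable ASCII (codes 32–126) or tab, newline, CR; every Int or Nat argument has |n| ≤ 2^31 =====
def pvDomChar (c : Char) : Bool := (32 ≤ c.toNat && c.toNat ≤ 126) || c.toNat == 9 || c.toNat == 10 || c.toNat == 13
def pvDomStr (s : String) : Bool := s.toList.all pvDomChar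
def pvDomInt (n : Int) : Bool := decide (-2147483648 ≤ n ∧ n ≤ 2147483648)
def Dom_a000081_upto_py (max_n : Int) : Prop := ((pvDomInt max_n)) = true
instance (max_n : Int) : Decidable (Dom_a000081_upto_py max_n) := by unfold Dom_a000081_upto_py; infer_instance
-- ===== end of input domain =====

-- B replaces A's incrementally maintained divisor-sum array s[] by directly enumerating, for each
-- divisor d, its multiples below n (an alternative decomposition of the same double sum; not faster).

-- ===== PORT A =====
-- Python lists a, s are `List Int` indexed 0..N; each `for` loop is a fold over List.range'
-- (List.range' lo cnt step = range(lo, lo+cnt*step, step); range(n, N+1, n) has N/n elements);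
-- `s[m] += inc` is pvSieveAdd.
def pvSieveAdd (inc : Int) (s : List Int) (m : Nat) : List Int := s.set m (s.getD m 0 + inc)

def pvStepA (N : Nat) (st : List Int × List Int) (n : Nat) : List Int × List Int :=
  let acc := (List.range' 1 (n - 1)).foldl (fun acc k => acc + st.2.getD k 0 * st.1.getD (n - k) 0) 0
  let an := PySem.Int.floordiv acc ((n : Int) - 1)
  (st.1.set n an, (List.range' n (N / n) n).foldl (pvSieveAdd ((n : Int) * an)) st.2)

def a000081_upto_py (max_n : Int) : List Int :=
  if max_n ≤ 0 then []
  else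
    let N := max_n.toNat
    let a0 := (List.replicate (N + 1) (0 : Int)).set 1 1
    let s0 := (List.range' 1 N).foldl (pvSieveAdd 1) (List.replicate (N + 1) (0 : Int))
    ((List.range' 2 (N - 1)).foldl (pvStepA N) (a0, s0)).1.drop 1

-- ===== PORT B =====
-- range(d, n, d) has (n-1)/d elements
def pvStepB (a : List Int) (n : Nat) : List Int :=
  let total := (List.range' 1 (n - 1)).foldl (fun t (d : Nat) =>
    let sub := (List.range' d ((n - 1) / d) d).foldl (fun s (m : Nat) => s + a.getD (n - m) 0) 0
    t + (d : Int) * a.getD d 0 * sub) 0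
  a.set n (PySem.Int.floordiv total ((n : Int) - 1))

def a000081_upto_py_alt (max_n : Int) : List Int :=
  if max_n ≤ 0 then []
  else
    let N := max_n.toNat
    ((List.range' 2 (N - 1)).foldl pvStepB ((List.replicate (N + 1) (0 : Int)).set 1 1)).drop 1

-- ===== PRECONDITION & SPEC =====
def Spec_a000081_upto_py (max_n : Int) (out : List Int) : Prop := out = a000081_upto_py_alt max_n
instance (max_n : Int) (out : List Int) : Decidable (Spec_a000081_upto_py max_n out) := by unfold Spec_a000081_upto_py; infer_instance

-- ===== CLAIM (what is proved, stated in full; the proofs are below) =====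
def Claim_equal_a000081_upto_py : Prop := ∀ (max_n : Int), Dom_a000081_upto_py max_n → Spec_a000081_upto_py max_n (a000081_upto_py max_n)

-- ===== LEMMAS AND PROOFS =====

theorem pvGetD_set_ne (l : List Int) (i j : Nat) (v : Int) (h : i ≠ j) :
    (l.set i v).getD j 0 = l.getD j 0 := by
  simp only [List.getD, List.getElem?_set]
  rw [if_neg h]

theorem pvGetD_set_self (l : List Int) (i : Nat) (v : Int) (h : i < l.length) :
    (l.set i v).getD i 0 = v := by
  simp [List.getD, h]

theorem pvSieve_length (inc : Int) (l : List Nat) (s : List Int) :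
    (l.foldl (pvSieveAdd inc) s).length = s.length := by
  induction l generalizing s with
  | nil => rfl
  | cons x t ih => simp [List.foldl_cons, ih, pvSieveAdd]

theorem pvSieve_getD_notmem (inc : Int) (l : List Nat) (s : List Int) (j : Nat) (hj : j ∉ l) :
    (l.foldl (pvSieveAdd inc) s).getD j 0 = s.getD j 0 := by
  induction l generalizing s with
  | nil => rfl
  | cons x t ih =>
    simp only [List.mem_cons, not_or] at hj
    simp only [List.foldl_cons]
    rw [ih _ hj.2, pvSieveAdd, pvGetD_set_ne _ _ _ _ (fun h => hj.1 h.symm)]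

theorem pvSieve_getD (inc : Int) (l : List Nat) (hl : l.Nodup) (s : List Int)
    (hlen : ∀ x ∈ l, x < s.length) (j : Nat) :
    (l.foldl (pvSieveAdd inc) s).getD j 0 = s.getD j 0 + if j ∈ l then inc else 0 := by
  induction l generalizing s with
  | nil => simp
  | cons x t ih =>
    rw [List.nodup_cons] at hl
    simp only [List.foldl_cons]
    by_cases hx : j = x
    · subst hx
      rw [pvSieve_getD_notmem _ _ _ _ hl.1, pvSieveAdd,
        pvGetD_set_self _ _ _ (hlen _ (by simp))]
      simp
    · rw [ih hl.2 _
        (fun y hy => by rw [pvSieveAdd, List.length_set]; exact hlen _ (List.mem_cons_of_mem _ hy)),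
        pvSieveAdd, pvGetD_set_ne _ _ _ _ (fun h => hx h.symm)]
      simp [List.mem_cons, hx]

-- the divisor-sum value A's s array maintains: pvSdef a n m = sum_{d=1..n, d | m} d * a[d]
def pvSdef (a : List Int) (n m : Nat) : Int :=
  ∑ d ∈ Finset.Icc 1 n, if m % d = 0 then (d : Int) * a.getD d 0 else 0

-- the common double-sum term
def pvF (a : List Int) (n d k : Nat) : Int :=
  if k % d = 0 then (d : Int) * a.getD d 0 * a.getD (n - k) 0 else 0

theorem pvSum_range'_one (m : Nat) (f : Nat → Int) :
    ((List.range' 1 m).map f).sum = ∑ k ∈ Finset.Icc 1 m, f k := by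
  induction m with
  | zero => simp
  | succ k ih =>
    rw [List.range'_concat, List.map_append, List.sum_append, ih,
      Finset.sum_Icc_succ_top (by omega)]
    simp [Nat.add_comm]

theorem pvMem_range'_mul (d c m : Nat) (hd : 1 ≤ d) :
    m ∈ List.range' d c d ↔ d ∣ m ∧ 1 ≤ m ∧ m ≤ d * c := by
  rw [List.mem_range']
  constructor
  · rintro ⟨i, hi, rfl⟩
    refine ⟨⟨i + 1, by ring⟩, by omega, ?_⟩
    calc d + d * i = d * (i + 1) := by ring
    _ ≤ d * c := Nat.mul_le_mul_left d (by omega)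
  · rintro ⟨⟨q, rfl⟩, h1, h2⟩
    have hq1 : 1 ≤ q := by
      rcases Nat.eq_zero_or_pos q with h | h
      · subst h; omega
      · exact h
    have hqc : q ≤ c := Nat.le_of_mul_le_mul_left h2 (by omega)
    refine ⟨q - 1, by omega, ?_⟩
    have h3 : q - 1 + 1 = q := by omega
    calc d * q = d * (q - 1 + 1) := by rw [h3]
    _ = d + d * (q - 1) := by ring

theorem pvNodup_range'_mul (s c d : Nat) (hd : 0 < d) : (List.range' s c d).Nodup := by
  induction c generalizing s with
  | zero => simp
  | succ c ih =>
    rw [List.range'_succ, List.nodup_cons]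
    refine ⟨fun hmem => ?_, ih _⟩
    rw [List.mem_range'] at hmem
    obtain ⟨i, _, hi⟩ := hmem
    omega

-- for a multiple k of d, k ≤ d * (M / d) iff k ≤ M
theorem pvDvd_le_div_mul (d k M : Nat) (hd : 1 ≤ d) (hdk : d ∣ k) :
    k ≤ d * (M / d) ↔ k ≤ M := by
  obtain ⟨q, rfl⟩ := hdk
  constructor
  · intro h
    calc d * q ≤ d * (M / d) := h
    _ = M / d * d := Nat.mul_comm _ _
    _ ≤ M := Nat.div_mul_le_self M d
  · intro h
    have h' : q * d ≤ M := by rw [Nat.mul_comm]; exact h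
    exact Nat.mul_le_mul_left d ((Nat.le_div_iff_mul_le (by omega)).2 h')

-- B's inner loop over the multiples of d, as an indicator sum over all k in [1, n-1]
theorem pvInnerB_sum (a : List Int) (n d : Nat) (hd : 1 ≤ d) :
    (d : Int) * a.getD d 0
        * ((List.range' d ((n - 1) / d) d).map (fun m => a.getD (n - m) 0)).sum
      = ∑ k ∈ Finset.Icc 1 (n - 1), pvF a n d k := by
  rw [← List.sum_map_mul_left]
  have hnd : (List.range' d ((n - 1) / d) d).Nodup := pvNodup_range'_mul _ _ _ (by omega)
  rw [← List.sum_toFinset _ hnd]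
  have hset : (List.range' d ((n - 1) / d) d).toFinset
      = (Finset.Icc 1 (n - 1)).filter (fun k => k % d = 0) := by
    ext k
    simp only [List.mem_toFinset, Finset.mem_filter, Finset.mem_Icc,
      pvMem_range'_mul _ _ _ hd, ← Nat.dvd_iff_mod_eq_zero]
    constructor
    · rintro ⟨hdvd, h1, h2⟩
      exact ⟨⟨h1, (pvDvd_le_div_mul d k (n - 1) hd hdvd).1 h2⟩, hdvd⟩
    · rintro ⟨⟨h1, h2⟩, hdvd⟩
      exact ⟨hdvd, h1, (pvDvd_le_div_mul d k (n - 1) hd hdvd).2 h2⟩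
  rw [hset, Finset.sum_filter]
  exact Finset.sum_congr rfl (fun k _ => rfl)

theorem pvStepB_eq (a : List Int) (n : Nat) (_hn : 2 ≤ n) :
    pvStepB a n = a.set n (PySem.Int.floordiv
      (∑ d ∈ Finset.Icc 1 (n - 1), ∑ k ∈ Finset.Icc 1 (n - 1), pvF a n d k) ((n : Int) - 1)) := by
  simp only [pvStepB]
  congr 2
  have hcong : (List.range' 1 (n - 1)).foldl
      (fun (t : Int) (d : Nat) =>
        t + (d : Int) * a.getD d 0
          * (List.range' d ((n - 1) / d) d).foldl (fun s (m : Nat) => s + a.getD (n - m) 0) 0) 0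
      = (List.range' 1 (n - 1)).foldl
        (fun (t : Int) (d : Nat) => t + ∑ k ∈ Finset.Icc 1 (n - 1), pvF a n d k) 0 := by
    apply PySem.List.foldl_congr_mem
    intro t d hd
    rw [List.mem_range'_1] at hd
    rw [PySem.List.foldl_add (g := fun m => a.getD (n - m) 0), zero_add,
      pvInnerB_sum a n d (by omega)]
  rw [hcong, PySem.List.foldl_add (g := fun d => ∑ k ∈ Finset.Icc 1 (n - 1), pvF a n d k),
    pvSum_range'_one, zero_add]

theorem pvAccA_eq (a s : List Int) (n : Nat) (_hn : 2 ≤ n)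
    (hs : ∀ k, 1 ≤ k → k ≤ n - 1 → s.getD k 0 = pvSdef a (n - 1) k) :
    (List.range' 1 (n - 1)).foldl (fun acc k => acc + s.getD k 0 * a.getD (n - k) 0) 0
      = ∑ d ∈ Finset.Icc 1 (n - 1), ∑ k ∈ Finset.Icc 1 (n - 1), pvF a n d k := by
  rw [PySem.List.foldl_add, pvSum_range'_one, zero_add, Finset.sum_comm]
  apply Finset.sum_congr rfl
  intro k hk
  rw [Finset.mem_Icc] at hk
  rw [hs k hk.1 hk.2, pvSdef, Finset.sum_mul]
  apply Finset.sum_congr rfl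
  intro d _
  rw [pvF, ite_mul, zero_mul]

-- pvSdef after recording a(n): one more divisor candidate d = n
theorem pvSdef_set (a : List Int) (n m : Nat) (an : Int) (hn : 1 ≤ n) (hlen : n < a.length) :
    pvSdef (a.set n an) n m
      = pvSdef a (n - 1) m + if m % n = 0 then (n : Int) * an else 0 := by
  unfold pvSdef
  have h1 : n - 1 + 1 = n := by omega
  rw [← h1, Finset.sum_Icc_succ_top (by omega)]
  congr 1
  · apply Finset.sum_congr rfl
    intro d hd
    rw [Finset.mem_Icc] at hd
    rw [pvGetD_set_ne _ _ _ _ (by omega)]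
  · rw [h1, pvGetD_set_self _ _ _ hlen]

-- abbreviations for the two loop states (proof-side only)
def pvInitA (N : Nat) : List Int := (List.replicate (N + 1) (0 : Int)).set 1 1
def pvInitS (N : Nat) : List Int :=
  (List.range' 1 N).foldl (pvSieveAdd 1) (List.replicate (N + 1) (0 : Int))
def pvRunA (N c : Nat) : List Int × List Int :=
  (List.range' 2 c).foldl (pvStepA N) (pvInitA N, pvInitS N)
def pvRunB (N c : Nat) : List Int := (List.range' 2 c).foldl pvStepB (pvInitA N)

theorem pvMem_multiples_iff (d N m : Nat) (hd : 1 ≤ d) (hm1 : 1 ≤ m) (hmN : m ≤ N) :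
    m ∈ List.range' d (N / d) d ↔ d ∣ m := by
  rw [pvMem_range'_mul _ _ _ hd]
  constructor
  · rintro ⟨hdvd, _, _⟩; exact hdvd
  · intro hdvd
    exact ⟨hdvd, hm1, (pvDvd_le_div_mul d m N hd hdvd).2 hmN⟩

-- main loop invariant: after c outer iterations the a arrays agree and
-- s[m] = pvSdef a (c+1) m on 1..N
theorem pvMain_inv (N : Nat) (hN : 1 ≤ N) (c : Nat) (hc : c ≤ N - 1) :
    (pvRunA N c).1 = pvRunB N c ∧ (pvRunA N c).1.length = N + 1 ∧
      (pvRunA N c).2.length = N + 1 ∧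
      ∀ m, 1 ≤ m → m ≤ N → (pvRunA N c).2.getD m 0 = pvSdef (pvRunA N c).1 (c + 1) m := by
  induction c with
  | zero =>
    refine ⟨rfl, by simp [pvRunA, pvInitA], ?_, ?_⟩
    · simp [pvRunA, pvInitS, pvSieve_length]
    · intro m hm1 hmN
      simp only [pvRunA, List.range'_zero, List.foldl_nil]
      rw [pvInitS, pvSieve_getD 1 _ (pvNodup_range'_mul _ _ _ (by omega)) _
          (fun x hx => by
            rw [List.length_replicate]; rw [List.mem_range'_1] at hx; omega) m,
        if_pos (by rw [List.mem_range'_1]; omega)]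
      have hrep : (List.replicate (N + 1) (0 : Int)).getD m 0 = 0 := by
        simp [List.getD, (by omega : m < N + 1)]
      rw [hrep, pvSdef]
      rw [show (0 : Nat) + 1 = 1 from rfl, Finset.Icc_self, Finset.sum_singleton,
        if_pos (Nat.mod_one m), pvInitA,
        pvGetD_set_self _ _ _ (by rw [List.length_replicate]; omega)]
      norm_num
  | succ c ih =>
    have hc' : c ≤ N - 1 := by omega
    obtain ⟨hab, hal, hsl, hs⟩ := ih hc'
    rcases hsplit : pvRunA N c with ⟨A, S⟩
    rw [hsplit] at hab hal hsl hs
    have hn2 : 2 ≤ 2 + c := by omega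
    have hnN : 2 + c ≤ N := by omega
    have hrange : List.range' 2 (c + 1) = List.range' 2 c ++ [2 + c] := by
      rw [List.range'_concat]; simp
    have hA1 : pvRunA N (c + 1) = pvStepA N (A, S) (2 + c) := by
      simp only [pvRunA, hrange, List.foldl_append, List.foldl_cons, List.foldl_nil]
      rw [show (List.range' 2 c).foldl (pvStepA N) (pvInitA N, pvInitS N) = pvRunA N c from rfl,
        hsplit]
    have hB1 : pvRunB N (c + 1) = pvStepB (pvRunB N c) (2 + c) := by
      simp only [pvRunB, hrange, List.foldl_append, List.foldl_cons, List.foldl_nil]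
    have hsA : ∀ k, 1 ≤ k → k ≤ 2 + c - 1 → S.getD k 0 = pvSdef A (2 + c - 1) k := by
      intro k h1 h2
      have h3 := hs k h1 (by omega)
      rwa [show c + 1 = 2 + c - 1 from by omega] at h3
    have hacc := pvAccA_eq A S (2 + c) hn2 hsA
    have h1 : (pvStepA N (A, S) (2 + c)).1 = pvStepB (pvRunB N c) (2 + c) := by
      rw [pvStepB_eq _ _ hn2, ← hab]
      simp only [pvStepA]
      rw [hacc]
    have hal' : (pvStepA N (A, S) (2 + c)).1.length = N + 1 := by
      simp only [pvStepA]; rw [List.length_set, hal]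
    have hsl' : (pvStepA N (A, S) (2 + c)).2.length = N + 1 := by
      simp only [pvStepA]; rw [pvSieve_length, hsl]
    refine ⟨by rw [hA1, hB1, h1], by rw [hA1]; exact hal', by rw [hA1]; exact hsl', ?_⟩
    intro m hm1 hmN
    rw [hA1]
    simp only [pvStepA]
    rw [pvSieve_getD _ _ (pvNodup_range'_mul _ _ _ (by omega)) _
        (fun x hx => by
          rw [hsl]
          rw [pvMem_range'_mul _ _ _ (by omega)] at hx
          have h4 := (pvDvd_le_div_mul (2 + c) x N (by omega) hx.1).1 hx.2.2
          omega) m,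
      hs m hm1 hmN]
    have hset := pvSdef_set A (2 + c) m
      (PySem.Int.floordiv
        ((List.range' 1 (2 + c - 1)).foldl
          (fun acc k => acc + S.getD k 0 * A.getD (2 + c - k) 0) 0) (((2 + c : Nat) : Int) - 1))
      (by omega) (by rw [hal]; omega)
    rw [show c + 1 + 1 = 2 + c from by omega, hset,
      show c + 1 = 2 + c - 1 from by omega]
    by_cases hdvd : (2 + c) ∣ m
    · rw [if_pos ((pvMem_multiples_iff (2 + c) N m (by omega) hm1 hmN).2 hdvd),
        if_pos (Nat.dvd_iff_mod_eq_zero.1 hdvd)]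
    · rw [if_neg (fun hm => hdvd ((pvMem_multiples_iff (2 + c) N m (by omega) hm1 hmN).1 hm)),
        if_neg (fun hm => hdvd (Nat.dvd_iff_mod_eq_zero.2 hm))]

-- ===== VERDICT (by name: the statement is the Claim_ definition above) =====
theorem a000081_upto_py_spec : Claim_equal_a000081_upto_py := by
  intro max_n _
  unfold Spec_a000081_upto_py a000081_upto_py a000081_upto_py_alt
  by_cases h : max_n ≤ 0
  · simp [h]
  · simp only [h, if_false]
    have hN : 1 ≤ max_n.toNat := by omega
    show ((pvRunA max_n.toNat (max_n.toNat - 1)).1).drop 1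
      = (pvRunB max_n.toNat (max_n.toNat - 1)).drop 1
    exact congrArg (List.drop 1) (pvMain_inv max_n.toNat hN (max_n.toNat - 1) le_rfl).1
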